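-- pv_equiv track=rewrite | github.com/denemorhun/Python-Problems | Grokking the Python Interview/Data Structures/Lists/max_min_list.py | max_min_opt
-- ===== SOURCE A (Python) =====
-- def max_min_opt(a):
--     result = []
--     # iterate half list
--     for i in range(len(a)//2):
--         # Append corresponding last element
--         result.append(a[-(i+1)])
--         # append current element
--         result.append(a[i])
--     if len(a) % 2 == 1:
--         # if middle value then append
--         result.append(a[len(a)//2])
--     return result
-- ===== SOURCE B (Python) =====
-- def max_min_opt(a):
--     # iteratively peel the outer pair: emit last, first, continue on the middle a[1:-1]
--     result = []
--     mid = a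
--     while len(mid) >= 2:
--         result += [mid[-1], mid[0]]
--         mid = mid[1:-1]
--     return result + mid
-- ===== Notes on version B (the rewrite author's own statement) =====
-- stated objective: alternative
-- what changed: Replaced the index-arithmetic loop over the first half (negative indexing into the tail, plus an odd-middle fixup) by a loop that repeatedly peels the outer pair [last, first] off the current middle slice a[1:-1].
import Mathlib
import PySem

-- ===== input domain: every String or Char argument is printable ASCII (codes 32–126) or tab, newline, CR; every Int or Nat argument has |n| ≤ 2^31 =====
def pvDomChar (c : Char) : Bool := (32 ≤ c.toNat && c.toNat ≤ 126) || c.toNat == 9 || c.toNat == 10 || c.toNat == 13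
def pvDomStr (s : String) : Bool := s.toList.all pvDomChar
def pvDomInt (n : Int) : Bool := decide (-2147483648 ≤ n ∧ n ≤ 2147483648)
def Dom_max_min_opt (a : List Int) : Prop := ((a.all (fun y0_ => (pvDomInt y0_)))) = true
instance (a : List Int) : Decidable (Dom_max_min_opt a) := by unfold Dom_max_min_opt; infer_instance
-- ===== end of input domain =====

-- B replaces A's half-length index loop (append a[-(i+1)] then a[i], plus the odd middle)
-- by a recursion that peels the outer pair [last, first] and recurses on the middle slice
-- a[1:-1] (alternative decomposition; same return value, proved below).


-- ===== PORT A =====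
-- literal transliteration of A: for i in range(len(a)//2) append a[-(i+1)] then a[i];
-- afterwards append the middle element a[len(a)//2] if the length is odd.
-- All indices are in range, so pyGetD (xs[i] with a default) is exact here.
def max_min_opt (a : List Int) : List Int :=
  let result : List Int := []
  let result := (PySem.List.pyRange 0 (PySem.Int.floordiv (a.length : Int) 2) 1).foldl
      (fun result i =>
        (result ++ [PySem.List.pyGetD a (-(i + 1)) 0]) ++ [PySem.List.pyGetD a i 0]) result
  if PySem.Int.mod (a.length : Int) 2 = 1 then
    result ++ [PySem.List.pyGetD a (PySem.Int.floordiv (a.length : Int) 2) 0]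
  else
    result

-- ===== PORT B =====
-- the slice a[1:-1] of Source B, and the length facts the recursion's termination needs
theorem pv_slice_mid_eq (a : List Int) :
    PySem.List.slice a (some 1) (some (-1)) = a.tail.dropLast := by
  rcases eq_or_ne a [] with rfl | h
  · simp [PySem.List.slice, PySem.List.clampIdx]
  · have hlen : 1 ≤ a.length := List.length_pos_iff.mpr h
    simp [PySem.List.slice, PySem.List.clampIdx, h]
    have h1 : min 1 a.length = 1 := by omega
    have h2 : ((a.length : Int) + -1).toNat = a.length - 1 := by omega
    rw [h1, h2, List.dropLast_eq_take, ← List.drop_one]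
    congr 1
    simp [List.length_drop]

theorem pv_slice_mid_lt (a : List Int) (h : ¬ a = []) :
    (PySem.List.slice a (some 1) (some (-1))).length < a.length := by
  rw [pv_slice_mid_eq]
  have : 1 ≤ a.length := List.length_pos_iff.mpr h
  simp [List.length_dropLast, List.length_tail]
  omega

-- the while loop of Source B: peel [mid[-1], mid[0]] onto result while len(mid) >= 2
def pvPeel (result : List Int) (mid : List Int) : List Int :=
  if h : 2 ≤ mid.length then
    pvPeel (result ++ [PySem.List.pyGetD mid (-1) 0, PySem.List.pyGetD mid 0 0])
      (PySem.List.slice mid (some 1) (some (-1)))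
  else
    result ++ mid
termination_by mid.length
decreasing_by exact pv_slice_mid_lt mid (by intro hnil; rw [hnil] at h; simp at h)

-- literal transliteration of Source B
def max_min_opt_alt (a : List Int) : List Int := pvPeel [] a

-- ===== PRECONDITION & SPEC =====
def Spec_max_min_opt (a : List Int) (out : List Int) : Prop := out = max_min_opt_alt a
instance (a : List Int) (out : List Int) : Decidable (Spec_max_min_opt a out) := by unfold Spec_max_min_opt; infer_instance

-- ===== CLAIM (what is proved, stated in full; the proofs are below) =====
def Claim_equal_max_min_opt : Prop := ∀ (a : List Int), Dom_max_min_opt a → Spec_max_min_opt a (max_min_opt a)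

-- ===== LEMMAS AND PROOFS =====

-- A's loop output, characterised: the interleaved first-half part as a flatMap, plus the middle
def pvHalf (a : List Int) : List Int :=
  (List.range (a.length / 2)).flatMap
    (fun (k : Nat) => [PySem.List.pyGetD a (-((k : Int) + 1)) 0, PySem.List.pyGetD a (k : Int) 0])

def pvMid (a : List Int) : List Int :=
  if a.length % 2 = 1 then [PySem.List.pyGetD a ((a.length / 2 : Nat) : Int) 0] else []

theorem pv_foldl_two (u v : Int → Int) (l : List Int) (init : List Int) :
    l.foldl (fun r i => (r ++ [u i]) ++ [v i]) init = init ++ l.flatMap (fun i => [u i, v i]) := by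
  induction l generalizing init with
  | nil => simp
  | cons x xs ih => simp [ih, List.flatMap]

theorem pv_A_eq (a : List Int) : max_min_opt a = pvHalf a ++ pvMid a := by
  unfold max_min_opt pvHalf pvMid
  have hf : PySem.Int.floordiv (a.length : Int) 2 = ((a.length / 2 : Nat) : Int) := by
    exact_mod_cast PySem.Int.floordiv_natCast a.length 2
  have hm : PySem.Int.mod (a.length : Int) 2 = ((a.length % 2 : Nat) : Int) := by
    exact_mod_cast PySem.Int.mod_natCast a.length 2
  simp only [hf, hm, PySem.List.pyRange_one, pv_foldl_two, sub_zero, Int.toNat_natCast,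
    List.flatMap_map, List.nil_append]
  by_cases ho : a.length % 2 = 1
  · simp only [ho, Nat.cast_one, if_pos rfl, if_pos trivial]
    congr 1
    apply List.flatMap_congr
    intro k _
    simp
  · have hm2 : ((a.length % 2 : Nat) : Int) ≠ 1 := by exact_mod_cast ho
    simp only [if_neg hm2, if_neg ho, List.append_nil]
    apply List.flatMap_congr
    intro k _
    simp

-- index shift: element k+1 of x :: m ++ [y] (from either end) is element k of m
theorem pv_pos (x y : Int) (m : List Int) (k : Nat) (hk : k < m.length) :
    PySem.List.pyGetD (x :: (m ++ [y])) ((k : Int) + 1) 0 = PySem.List.pyGetD m (k : Int) 0 := by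
  rw [show ((k : Int) + 1) = ((k + 1 : Nat) : Int) by push_cast; ring]
  rw [PySem.List.pyGetD_natCast, PySem.List.pyGetD_natCast]
  simp [List.getD_eq_getElem?_getD, List.getElem?_append_left hk]

theorem pv_neg (x y : Int) (m : List Int) (k : Nat) (hk : k < m.length) :
    PySem.List.pyGetD (x :: (m ++ [y])) (-((k : Int) + 2)) 0
      = PySem.List.pyGetD m (-((k : Int) + 1)) 0 := by
  rw [show (-((k : Int) + 2)) = -(((k + 2 : Nat) : Int)) by push_cast; ring,
      show (-((k : Int) + 1)) = -(((k + 1 : Nat) : Int)) by push_cast; ring]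
  rw [PySem.List.pyGetD_neg_natCast _ _ _ (by omega) (by simp; omega),
      PySem.List.pyGetD_neg_natCast _ _ _ (by omega) (by omega)]
  rw [List.getElem_eq_iff]
  have hidx : (x :: (m ++ [y])).length - (k + 2) = (m.length - (k + 1)) + 1 := by
    have : (x :: (m ++ [y])).length = m.length + 2 := by simp
    omega
  rw [hidx, List.getElem?_cons_succ,
    List.getElem?_append_left (show m.length - (k + 1) < m.length by omega),
    List.getElem?_eq_getElem (by omega)]

theorem pv_half_ends (x y : Int) (m : List Int) :
    pvHalf (x :: (m ++ [y])) = y :: x :: pvHalf m := by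
  unfold pvHalf
  have hlen : (x :: (m ++ [y])).length = m.length + 2 := by simp
  rw [hlen]
  have hdiv : (m.length + 2) / 2 = m.length / 2 + 1 := by omega
  rw [hdiv, List.range_succ_eq_map, List.flatMap_cons, List.flatMap_map]
  have h0 : PySem.List.pyGetD (x :: (m ++ [y])) (-(((0 : Nat) : Int) + 1)) 0 = y := by
    simpa using PySem.List.pyGetD_neg_one_append_singleton (x :: m) y (0 : Int)
  have h0' : PySem.List.pyGetD (x :: (m ++ [y])) (((0 : Nat) : Int)) 0 = x := by
    simpa using PySem.List.pyGetD_zero_cons x (m ++ [y]) (0 : Int)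
  rw [h0, h0', List.cons_append, List.cons_append, List.nil_append]
  congr 1
  congr 1
  apply List.flatMap_congr
  intro k hk
  have hkm : k < m.length := by have := List.mem_range.mp hk; omega
  simp only [Nat.succ_eq_add_one]
  have e1 := pv_neg x y m k hkm
  have e2 := pv_pos x y m k hkm
  rw [show (-((((k + 1 : Nat)) : Int) + 1)) = -((k : Int) + 2) by push_cast; ring,
      show ((((k + 1 : Nat))) : Int) = ((k : Int) + 1) by push_cast; ring,
      e1, e2]

theorem pv_mid_ends (x y : Int) (m : List Int) :
    pvMid (x :: (m ++ [y])) = pvMid m := by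
  unfold pvMid
  have hlen : (x :: (m ++ [y])).length = m.length + 2 := by simp
  rw [hlen]
  have hmod : (m.length + 2) % 2 = m.length % 2 := by omega
  have hdiv : (m.length + 2) / 2 = m.length / 2 + 1 := by omega
  rw [hmod, hdiv]
  by_cases ho : m.length % 2 = 1
  · simp only [ho, if_pos rfl]
    have hkm : m.length / 2 < m.length := by omega
    have := pv_pos x y m (m.length / 2) hkm
    rw [show (((m.length / 2 + 1 : Nat)) : Int) = ((m.length / 2 : Nat) : Int) + 1 by push_cast; ring]
    rw [this]
  · simp [ho]

-- proof-side recursive form of B's peel loop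
def pvRec (a : List Int) : List Int :=
  if h : a = [] then []
  else if a.length = 1 then [PySem.List.pyGetD a 0 0]
  else
    [PySem.List.pyGetD a (-1) 0, PySem.List.pyGetD a 0 0] ++
      pvRec (PySem.List.slice a (some 1) (some (-1)))
termination_by a.length
decreasing_by exact pv_slice_mid_lt a h

theorem pv_main_rec (a : List Int) : max_min_opt a = pvRec a := by
  have H : ∀ n (a : List Int), a.length = n → max_min_opt a = pvRec a := by
    intro n
    induction n using Nat.strong_induction_on with
    | _ n ih =>
      intro a ha
      rcases a with _ | ⟨x, r⟩
      · rw [pv_A_eq, pvRec]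
        simp [pvHalf, pvMid]
      · rcases eq_or_ne r [] with rfl | hr
        · rw [pv_A_eq, pvRec]
          simp [pvHalf, pvMid, PySem.List.pyGetD_zero_cons]
        · have hr2 : r.dropLast ++ [r.getLast hr] = r := List.dropLast_append_getLast hr
          have ha' : x :: r = x :: (r.dropLast ++ [r.getLast hr]) := by rw [hr2]
          rw [ha', pv_A_eq, pv_half_ends, pv_mid_ends, List.cons_append, List.cons_append, ← pv_A_eq]
          rw [pvRec]
          have hne : ¬ (x :: (r.dropLast ++ [r.getLast hr])) = [] := by simp
          have hlen : (x :: (r.dropLast ++ [r.getLast hr])).length = r.dropLast.length + 2 := by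
            simp
          rw [dif_neg hne, if_neg (by rw [hlen]; omega)]
          have hy : PySem.List.pyGetD (x :: (r.dropLast ++ [r.getLast hr])) (-1) 0
              = r.getLast hr := by
            simpa using PySem.List.pyGetD_neg_one_append_singleton (x :: r.dropLast)
              (r.getLast hr) (0 : Int)
          have hx : PySem.List.pyGetD (x :: (r.dropLast ++ [r.getLast hr])) 0 0 = x :=
            PySem.List.pyGetD_zero_cons x _ 0
          rw [hy, hx, pv_slice_mid_eq]
          have hsl : (x :: (r.dropLast ++ [r.getLast hr])).tail.dropLast = r.dropLast := by
            simp
          rw [hsl]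
          have hlt : r.dropLast.length < n := by
            rw [← ha, ha', hlen]; omega
          rw [ih r.dropLast.length hlt r.dropLast rfl]
          rfl
  exact H a.length a rfl

theorem pv_peel_eq_rec (mid : List Int) : ∀ result, pvPeel result mid = result ++ pvRec mid := by
  have H : ∀ n (mid : List Int), mid.length = n →
      ∀ result, pvPeel result mid = result ++ pvRec mid := by
    intro n
    induction n using Nat.strong_induction_on with
    | _ n ih =>
      intro mid hn result
      rw [pvPeel, pvRec]
      by_cases h2 : 2 ≤ mid.length
      · have hne : ¬ mid = [] := by intro hnil; rw [hnil] at h2; simp at h2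
        have hlt : (PySem.List.slice mid (some 1) (some (-1))).length < n := by
          rw [← hn]; exact pv_slice_mid_lt mid hne
        rw [dif_pos h2, dif_neg hne, if_neg (by omega),
          ih _ hlt _ rfl, List.append_assoc]
      · rw [dif_neg h2]
        rcases mid with _ | ⟨x, r⟩
        · simp
        · have hr : r = [] := by
            rcases r with _ | _
            · rfl
            · exfalso; exact h2 (by simp)
          subst hr
          simp [PySem.List.pyGetD_zero_cons]
  exact fun result => H mid.length mid rfl result

theorem pv_main (a : List Int) : max_min_opt a = max_min_opt_alt a := by
  rw [max_min_opt_alt, pv_peel_eq_rec, List.nil_append]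
  exact pv_main_rec a

-- ===== VERDICT (by name: the statement is the Claim_ definition above) =====
theorem max_min_opt_spec : Claim_equal_max_min_opt := by
  intro a _
  unfold Spec_max_min_opt
  exact pv_main a
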